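-- pv_equiv track=rewrite | github.com/sfboss/google-ads-python | adwords_service.py | _identify_content_themes
-- ===== SOURCE A (Python) =====
-- from typing import List, Dict, Any, Optional
--
-- def _identify_content_themes(top_keywords: List[Dict[str, Any]]) -> List[str]:
--     """Identify content themes from top keywords.
--
--     Args:
--         top_keywords: List of top keyword dictionaries.
--
--     Returns:
--         List of identified themes.
--     """
--     if not top_keywords:
--         return []
--
--     # Simple theme identification based on keyword patterns
--     themes = []
--     keywords = [kw["keyword"] for kw in top_keywords]
--
--     # Technology themes
--     tech_keywords = ["data", "ai", "software", "technology", "digital", "platform", "system"]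
--     if any(kw in keywords for kw in tech_keywords):
--         themes.append("Technology")
--
--     # Business themes
--     business_keywords = ["business", "sales", "marketing", "customer", "service", "crm"]
--     if any(kw in keywords for kw in business_keywords):
--         themes.append("Business")
--
--     # Entertainment themes
--     entertainment_keywords = ["music", "video", "entertainment", "song", "artist"]
--     if any(kw in keywords for kw in entertainment_keywords):
--         themes.append("Entertainment")
--
--     # Education themes
--     education_keywords = ["learn", "training", "education", "tutorial", "guide"]
--     if any(kw in keywords for kw in education_keywords):
--         themes.append("Education")
--
--     return themes if themes else ["General"]
-- ===== SOURCE B (Python) =====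
-- _THEMES = [
--     ("Technology", ["data", "ai", "software", "technology", "digital", "platform", "system"]),
--     ("Business", ["business", "sales", "marketing", "customer", "service", "crm"]),
--     ("Entertainment", ["music", "video", "entertainment", "song", "artist"]),
--     ("Education", ["learn", "training", "education", "tutorial", "guide"]),
-- ]
-- _THEME_OF = {w: t for t, ws in _THEMES for w in ws}
-- _THEME_ORDER = [t for t, _ in _THEMES]
--
--
-- def _identify_content_themes(top_keywords):
--     if not top_keywords:
--         return []
--     found = set()
--     for kw in top_keywords:
--         theme = _THEME_OF.get(kw["keyword"])
--         if theme is not None: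
--             found.add(theme)
--     themes = [t for t in _THEME_ORDER if t in found]
--     return themes if themes else ["General"]
-- ===== Notes on version B (the rewrite author's own statement) =====
-- stated objective: idiomatic
-- what changed: Replaces A's four separate any()-scans of the keyword list (one per hard-coded category list) with a precomputed keyword->theme dict, a single pass over the keywords collecting found themes into a set, and a filter of the canonical theme order.
import Mathlib
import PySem

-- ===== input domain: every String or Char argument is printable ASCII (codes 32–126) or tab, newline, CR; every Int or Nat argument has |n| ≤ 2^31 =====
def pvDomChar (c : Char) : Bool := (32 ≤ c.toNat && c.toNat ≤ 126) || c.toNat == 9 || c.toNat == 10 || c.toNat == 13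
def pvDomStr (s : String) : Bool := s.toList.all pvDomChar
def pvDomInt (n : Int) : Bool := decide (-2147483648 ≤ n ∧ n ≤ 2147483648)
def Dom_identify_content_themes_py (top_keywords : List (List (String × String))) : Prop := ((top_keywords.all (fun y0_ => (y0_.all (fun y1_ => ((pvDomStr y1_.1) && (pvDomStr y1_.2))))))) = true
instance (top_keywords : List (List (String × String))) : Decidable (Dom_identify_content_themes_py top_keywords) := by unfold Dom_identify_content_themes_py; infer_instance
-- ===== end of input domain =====

-- B replaces A's four any()-scans of the keyword list by one pass through a keyword→theme
-- dict collecting a set of found themes, then filters the canonical theme order (idiomatic).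

-- ===== PORT A =====
-- kw["keyword"]: KeyError (none) excluded by Pre_; getD "" is only a totalizer outside Pre_
def pvGetKeyword (kw : List (String × String)) : String :=
  ((PySem.Dict.mk kw).get? "keyword").getD ""

def pvTechKeywords : List String := ["data", "ai", "software", "technology", "digital", "platform", "system"]
def pvBusinessKeywords : List String := ["business", "sales", "marketing", "customer", "service", "crm"]
def pvEntertainmentKeywords : List String := ["music", "video", "entertainment", "song", "artist"]
def pvEducationKeywords : List String := ["learn", "training", "education", "tutorial", "guide"]

def identify_content_themes_py (top_keywords : List (List (String × String))) : List String :=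
  if top_keywords = [] then []
  else
    let keywords := top_keywords.map pvGetKeyword
    let themes : List String := []
    let themes := if pvTechKeywords.any (fun kw => keywords.contains kw) then themes ++ ["Technology"] else themes
    let themes := if pvBusinessKeywords.any (fun kw => keywords.contains kw) then themes ++ ["Business"] else themes
    let themes := if pvEntertainmentKeywords.any (fun kw => keywords.contains kw) then themes ++ ["Entertainment"] else themes
    let themes := if pvEducationKeywords.any (fun kw => keywords.contains kw) then themes ++ ["Education"] else themes
    if themes = [] then ["General"] else themes

-- ===== PORT B =====
def pvThemeOf : PySem.Dict String String := PySem.Dict.mk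
  [("data", "Technology"), ("ai", "Technology"), ("software", "Technology"), ("technology", "Technology"),
   ("digital", "Technology"), ("platform", "Technology"), ("system", "Technology"),
   ("business", "Business"), ("sales", "Business"), ("marketing", "Business"), ("customer", "Business"),
   ("service", "Business"), ("crm", "Business"),
   ("music", "Entertainment"), ("video", "Entertainment"), ("entertainment", "Entertainment"),
   ("song", "Entertainment"), ("artist", "Entertainment"),
   ("learn", "Education"), ("training", "Education"), ("education", "Education"),
   ("tutorial", "Education"), ("guide", "Education")]

def pvThemeOrder : List String := ["Technology", "Business", "Entertainment", "Education"]

def pvFoundStep (s : PySem.Set String) (k : String) : PySem.Set String :=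
  match pvThemeOf.get? k with
  | some t => PySem.Set.add s t
  | none => s

def identify_content_themes_py_alt (top_keywords : List (List (String × String))) : List String :=
  if top_keywords = [] then []
  else
    let keywords := top_keywords.map pvGetKeyword
    let found : PySem.Set String := keywords.foldl pvFoundStep PySem.Set.empty
    let themes := pvThemeOrder.filter (fun t => PySem.Set.contains found t)
    if themes = [] then ["General"] else themes

-- ===== PRECONDITION & SPEC =====
-- Pre_ excludes exactly the inputs where some keyword dict lacks the key "keyword": there A
-- (and B) raise KeyError.
def Pre_identify_content_themes_py (top_keywords : List (List (String × String))) : Prop :=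
  (top_keywords.all (fun kw => kw.any (fun p => p.1 == "keyword"))) = true

instance (top_keywords : List (List (String × String))) : Decidable (Pre_identify_content_themes_py top_keywords) := by
  unfold Pre_identify_content_themes_py; infer_instance

def pvWitness_identify_content_themes_py : (List (List (String × String))) :=
  [[("keyword", "data")]]

def Spec_identify_content_themes_py (top_keywords : List (List (String × String))) (out : List String) : Prop := out = identify_content_themes_py_alt top_keywords
instance (top_keywords : List (List (String × String))) (out : List String) : Decidable (Spec_identify_content_themes_py top_keywords out) := by unfold Spec_identify_content_themes_py; infer_instance

-- ===== CLAIM (what is proved, stated in full; the proofs are below) =====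
def Claim_equal_identify_content_themes_py : Prop := ∀ (top_keywords : List (List (String × String))), Dom_identify_content_themes_py top_keywords → Pre_identify_content_themes_py top_keywords → Spec_identify_content_themes_py top_keywords (identify_content_themes_py top_keywords)

-- ===== LEMMAS AND PROOFS =====

lemma mem_foldl_found (ks : List String) (s : PySem.Set String) (T : String) :
    T ∈ ks.foldl pvFoundStep s ↔ T ∈ s ∨ ∃ k ∈ ks, pvThemeOf.get? k = some T := by
  induction ks generalizing s with
  | nil => simp
  | cons k ks ih =>
    simp only [List.foldl_cons, ih]
    unfold pvFoundStep
    cases h : pvThemeOf.get? k with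
    | none =>
      simp only [List.mem_cons]
      constructor
      · rintro (hs | ⟨x, hx, hg⟩)
        · exact Or.inl hs
        · exact Or.inr ⟨x, Or.inr hx, hg⟩
      · rintro (hs | ⟨x, hx | hx, hg⟩)
        · exact Or.inl hs
        · subst hx; rw [h] at hg; cases hg
        · exact Or.inr ⟨x, hx, hg⟩
    | some t =>
      rw [PySem.Set.mem_add]
      simp only [List.mem_cons]
      constructor
      · rintro ((hs | ht) | ⟨x, hx, hg⟩)
        · exact Or.inl hs
        · exact Or.inr ⟨k, Or.inl rfl, by rw [h, ht]⟩
        · exact Or.inr ⟨x, Or.inr hx, hg⟩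
      · rintro (hs | ⟨x, hx | hx, hg⟩)
        · exact Or.inl (Or.inl hs)
        · subst hx; rw [h] at hg; exact Or.inl (Or.inr (Option.some_inj.mp hg).symm)
        · exact Or.inr ⟨x, hx, hg⟩

lemma get?_mk_eq_some (l : List (String × String)) (hnd : (l.map Prod.fst).Nodup) (k T : String) :
    (PySem.Dict.mk l).get? k = some T ↔ (k, T) ∈ l := by
  induction l with
  | nil => simp [PySem.Dict.get?]
  | cons p rest ih =>
    obtain ⟨a, b⟩ := p
    simp only [List.map_cons, List.nodup_cons, List.mem_map] at hnd
    rw [PySem.Dict.get?_mk_cons]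
    by_cases hak : a = k
    · subst hak
      simp only [beq_self_eq_true, if_true, List.mem_cons, Prod.mk.injEq, true_and,
        Option.some_inj]
      constructor
      · exact fun hb => Or.inl hb.symm
      · rintro (hb | hmem)
        · exact hb.symm
        · exact absurd ⟨(a, T), hmem, rfl⟩ hnd.1
    · have hbeq : (a == k) = false := by simpa using hak
      rw [hbeq, if_neg (by simp), ih hnd.2]
      simp only [List.mem_cons, Prod.mk.injEq]
      constructor
      · exact Or.inr
      · rintro (⟨h1, _⟩ | hmem)
        · exact absurd h1.symm hak
        · exact hmem

lemma themeOf_theme (W : List String) (T : String)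
    (hfwd : ∀ k, k ∈ W → (k, T) ∈ pvThemeOf.items)
    (hbwd : ∀ p, p ∈ pvThemeOf.items → p.2 = T → p.1 ∈ W) (k : String) :
    pvThemeOf.get? k = some T ↔ k ∈ W := by
  have hnd : (pvThemeOf.items.map Prod.fst).Nodup := by decide
  have : pvThemeOf = PySem.Dict.mk pvThemeOf.items := rfl
  rw [this, get?_mk_eq_some _ hnd]
  constructor
  · exact fun h => hbwd (k, T) h rfl
  · exact fun h => hfwd k h

lemma cond_eq (ks : List String) (W : List String) (T : String)
    (hW : ∀ k, pvThemeOf.get? k = some T ↔ k ∈ W) :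
    (W.any (fun kw => ks.contains kw)) =
      PySem.Set.contains (ks.foldl pvFoundStep PySem.Set.empty) T := by
  rw [Bool.eq_iff_iff]
  simp only [List.any_eq_true, List.contains_eq_mem, decide_eq_true_eq,
    PySem.Set.contains, List.contains_eq_mem]
  rw [mem_foldl_found]
  simp only [PySem.Set.empty, List.not_mem_nil, false_or]
  constructor
  · rintro ⟨w, hw, hk⟩; exact ⟨w, hk, (hW w).mpr hw⟩
  · rintro ⟨x, hx, hg⟩; exact ⟨x, (hW x).mp hg, hx⟩

lemma core_eq (ks : List String) :
    (let themes : List String := []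
     let themes := if pvTechKeywords.any (fun kw => ks.contains kw) then themes ++ ["Technology"] else themes
     let themes := if pvBusinessKeywords.any (fun kw => ks.contains kw) then themes ++ ["Business"] else themes
     let themes := if pvEntertainmentKeywords.any (fun kw => ks.contains kw) then themes ++ ["Entertainment"] else themes
     let themes := if pvEducationKeywords.any (fun kw => ks.contains kw) then themes ++ ["Education"] else themes
     if themes = [] then ["General"] else themes) =
    (let found : PySem.Set String := ks.foldl pvFoundStep PySem.Set.empty
     let themes := pvThemeOrder.filter (fun t => PySem.Set.contains found t)
     if themes = [] then ["General"] else themes) := by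
  have h1 := cond_eq ks pvTechKeywords "Technology" (themeOf_theme _ _ (by decide) (by decide))
  have h2 := cond_eq ks pvBusinessKeywords "Business" (themeOf_theme _ _ (by decide) (by decide))
  have h3 := cond_eq ks pvEntertainmentKeywords "Entertainment" (themeOf_theme _ _ (by decide) (by decide))
  have h4 := cond_eq ks pvEducationKeywords "Education" (themeOf_theme _ _ (by decide) (by decide))
  simp only [pvThemeOrder, List.filter, ← h1, ← h2, ← h3, ← h4]
  cases (pvTechKeywords.any (fun kw => ks.contains kw)) <;>
    cases (pvBusinessKeywords.any (fun kw => ks.contains kw)) <;>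
    cases (pvEntertainmentKeywords.any (fun kw => ks.contains kw)) <;>
    cases (pvEducationKeywords.any (fun kw => ks.contains kw)) <;> rfl

-- ===== VERDICT (by name: the statement is the Claim_ definition above) =====
theorem identify_content_themes_py_spec : Claim_equal_identify_content_themes_py := by
  intro tk _ _
  unfold Spec_identify_content_themes_py identify_content_themes_py identify_content_themes_py_alt
  by_cases h : tk = []
  · simp [h]
  · simp only [h, if_false]
    exact core_eq (tk.map pvGetKeyword)
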